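-- pv_equiv track=rewrite | github.com/BlackCetus/PGP | scripts/folddisco_pipeline/generate_folddisco_input.py | collapse_ranges
-- ===== SOURCE A (Python) =====
-- from typing import List, Tuple
--
-- def collapse_ranges(chain: str, indices: List[int]) -> List[str]:
--     if not indices:
--         return []
--     indices = sorted(set(indices))
--     tokens: List[str] = []
--     start = prev = indices[0]
--     for x in indices[1:]:
--         if x == prev + 1:
--             prev = x
--             continue
--         if start == prev:
--             tokens.append(f"{chain}{start}")
--         else:
--             tokens.append(f"{chain}{start}-{prev}")
--         start = prev = x
--     if start == prev:
--         tokens.append(f"{chain}{start}")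
--     else:
--         tokens.append(f"{chain}{start}-{prev}")
--     return tokens
-- ===== SOURCE B (Python) =====
-- def collapse_ranges(chain, indices):
--     s = set(indices)
--     starts = sorted(x for x in s if x - 1 not in s)
--     ends = sorted(x for x in s if x + 1 not in s)
--     return [f"{chain}{a}" if a == b else f"{chain}{a}-{b}"
--             for a, b in zip(starts, ends)]
-- ===== Notes on version B (the rewrite author's own statement) =====
-- stated objective: alternative
-- what changed: A runs one stateful scan over the sorted indices maintaining start/prev and emitting tokens inline; B detects run boundaries by set membership (starts = elements x with x-1 not in the set, ends = elements with x+1 not in the set), sorts both boundary lists, and zips them into range tokens.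
import Mathlib
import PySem

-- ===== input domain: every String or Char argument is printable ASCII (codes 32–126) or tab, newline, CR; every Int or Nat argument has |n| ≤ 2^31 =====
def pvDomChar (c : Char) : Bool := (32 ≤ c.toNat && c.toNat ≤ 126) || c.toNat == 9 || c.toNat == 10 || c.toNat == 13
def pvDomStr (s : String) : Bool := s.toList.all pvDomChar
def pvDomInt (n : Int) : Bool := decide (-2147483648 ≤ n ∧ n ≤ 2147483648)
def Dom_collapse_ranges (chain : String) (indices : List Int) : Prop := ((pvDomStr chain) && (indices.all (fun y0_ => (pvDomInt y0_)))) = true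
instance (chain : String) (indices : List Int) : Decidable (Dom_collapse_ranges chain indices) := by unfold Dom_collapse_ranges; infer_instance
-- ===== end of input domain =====

-- B replaces A's stateful start/prev scan by membership-based boundary detection on the
-- set: run starts are the x with x-1 not in the set, run ends the x with x+1 not in the
-- set; sort both and zip them into ranges (objective: alternative; same cost).

-- ===== PORT A =====
-- token formatting f"{chain}{start}" / f"{chain}{start}-{prev}"
def pvTok (chain : String) (start prev : Int) : String :=
  if start = prev then chain ++ PySem.Int.toStr start
  else chain ++ PySem.Int.toStr start ++ "-" ++ PySem.Int.toStr prev

-- loop body of A's for-loop over indices[1:], state (start, prev, tokens)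
def pvStep (chain : String) (s : Int × Int × List String) (x : Int) : Int × Int × List String :=
  if x = s.2.1 + 1 then (s.1, x, s.2.2)
  else (x, x, s.2.2 ++ [pvTok chain s.1 s.2.1])

def collapse_ranges (chain : String) (indices : List Int) : List String :=
  if indices = [] then []
  else
    match PySem.List.sorted (PySem.Set.ofList indices) (fun x => x) false with
    | [] => []  -- unreachable totality guard: sorted(set(indices)) is nonempty here
    | y :: rest =>
      let st := rest.foldl (pvStep chain) (y, y, ([] : List String))
      st.2.2 ++ [pvTok chain st.1 st.2.1]

-- ===== PORT B =====
def collapse_ranges_alt (chain : String) (indices : List Int) : List String :=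
  let s := PySem.Set.ofList indices
  let starts := PySem.List.sorted (s.filter (fun x => !PySem.Set.contains s (x - 1))) (fun x => x) false
  let ends := PySem.List.sorted (s.filter (fun x => !PySem.Set.contains s (x + 1))) (fun x => x) false
  (starts.zip ends).map (fun p =>
    if p.1 = p.2 then chain ++ PySem.Int.toStr p.1
    else chain ++ PySem.Int.toStr p.1 ++ "-" ++ PySem.Int.toStr p.2)

-- ===== PRECONDITION & SPEC =====
def Spec_collapse_ranges (chain : String) (indices : List Int) (out : List String) : Prop := out = collapse_ranges_alt chain indices
instance (chain : String) (indices : List Int) (out : List String) : Decidable (Spec_collapse_ranges chain indices out) := by unfold Spec_collapse_ranges; infer_instance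

-- ===== CLAIM (what is proved, stated in full; the proofs are below) =====
def Claim_equal_collapse_ranges : Prop := ∀ (chain : String) (indices : List Int), Dom_collapse_ranges chain indices → Spec_collapse_ranges chain indices (collapse_ranges chain indices)

-- ===== LEMMAS AND PROOFS =====

-- proof-only helpers: the maximal consecutive runs of a strictly increasing list
def pvSpanRun (e : Int) : List Int → Int × List Int
  | [] => (e, [])
  | x :: rest => if x = e + 1 then pvSpanRun x rest else (e, x :: rest)

theorem pvSpanRun_length (e : Int) (l : List Int) : (pvSpanRun e l).2.length ≤ l.length := by
  induction l generalizing e with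
  | nil => simp [pvSpanRun]
  | cons x rest ih =>
    simp only [pvSpanRun]
    split
    · exact le_trans (ih x) (Nat.le_succ _)
    · simp

def pvRuns : List Int → List (Int × Int)
  | [] => []
  | y :: rest =>
    let p := pvSpanRun y rest
    (y, p.1) :: pvRuns p.2
termination_by l => l.length
decreasing_by simpa using Nat.lt_succ_of_le (pvSpanRun_length y rest)

-- A's loop, run from any state, produces the tokens of the runs of the remaining input
theorem pvLoop_runs (chain : String) (rest : List Int) : ∀ (start prev : Int) (tokens : List String),
    (rest.foldl (pvStep chain) (start, prev, tokens)).2.2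
      ++ [pvTok chain (rest.foldl (pvStep chain) (start, prev, tokens)).1
                      (rest.foldl (pvStep chain) (start, prev, tokens)).2.1]
    = tokens ++ ((start, (pvSpanRun prev rest).1) :: pvRuns (pvSpanRun prev rest).2).map
        (fun g => pvTok chain g.1 g.2) := by
  induction rest with
  | nil => intro start prev tokens; simp [pvSpanRun, pvRuns]
  | cons x xs ih =>
    intro start prev tokens
    by_cases hx : x = prev + 1
    · subst hx
      simp only [List.foldl_cons, pvStep, pvSpanRun]
      exact ih start (prev + 1) tokens
    · simp only [List.foldl_cons, pvStep, pvSpanRun, if_neg hx]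
      rw [ih x x (tokens ++ [pvTok chain start prev])]
      rw [pvRuns]
      simp

theorem pvSpanRun_cons_succ (e x : Int) (r : List Int) (h : x = e + 1) :
    pvSpanRun e (x :: r) = pvSpanRun x r := by simp [pvSpanRun, h]

theorem pvSpanRun_cons_ne (e x : Int) (r : List Int) (h : x ≠ e + 1) :
    pvSpanRun e (x :: r) = (e, x :: r) := by simp [pvSpanRun, h]

-- structural facts about the first run of a strictly increasing list
theorem pvSpan_props : ∀ (rest : List Int) (y : Int), (y :: rest).Pairwise (· < ·) →
    y ≤ (pvSpanRun y rest).1 ∧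
    (∀ z ∈ (pvSpanRun y rest).2, (pvSpanRun y rest).1 + 2 ≤ z) ∧
    (∀ z ∈ y :: rest, z ≤ (pvSpanRun y rest).1 ∨ z ∈ (pvSpanRun y rest).2) ∧
    (pvSpanRun y rest).2.Pairwise (· < ·) ∧
    (∀ z ∈ (pvSpanRun y rest).2, z ∈ rest) := by
  intro rest
  induction rest with
  | nil => intro y _; simp [pvSpanRun]
  | cons x r2 ih =>
    intro y hpw
    have hyx : y < x := (List.pairwise_cons.1 hpw).1 x (by simp)
    have hpw2 : (x :: r2).Pairwise (· < ·) := (List.pairwise_cons.1 hpw).2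
    by_cases hx : x = y + 1
    · subst hx
      have h := ih (y + 1) hpw2
      rw [pvSpanRun_cons_succ y (y + 1) r2 rfl]
      refine ⟨le_trans (by omega) h.1, h.2.1, ?_, h.2.2.2.1, fun z hz => by simp [h.2.2.2.2 z hz]⟩
      intro z hz
      rcases List.mem_cons.1 hz with h' | h'
      · left; omega
      · exact h.2.2.1 z h'
    · rw [pvSpanRun_cons_ne y x r2 hx]
      refine ⟨le_refl y, ?_, ?_, hpw2, fun z hz => hz⟩
      · intro z hz
        rcases List.mem_cons.1 hz with h' | h'
        · omega
        · have := (List.pairwise_cons.1 hpw2).1 z h'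
          omega
      · intro z hz
        rcases List.mem_cons.1 hz with h' | h'
        · left; omega
        · right; exact h'

-- interior elements of the first run are dropped by the start filter
theorem pvConsumed_dropped : ∀ (rest : List Int) (y : Int) (F : List Int),
    (∀ z ∈ y :: rest, z ∈ F) →
    rest.filter (fun x => !decide ((x - 1) ∈ F)) = (pvSpanRun y rest).2.filter (fun x => !decide ((x - 1) ∈ F)) := by
  intro rest
  induction rest with
  | nil => intro y F _; simp [pvSpanRun]
  | cons x r2 ih =>
    intro y F hF
    by_cases hx : x = y + 1
    · have hyF : y ∈ F := hF y (by simp)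
      have hdrop : (!decide ((x - 1) ∈ F)) = false := by
        simp [hx, hyF]
      rw [pvSpanRun_cons_succ y x r2 hx, List.filter_cons, hdrop]
      rw [if_neg (by simp)]
      exact ih x F (fun z hz => hF z (by simpa using Or.inr (List.mem_cons.1 hz)))
    · rw [pvSpanRun_cons_ne y x r2 hx]

-- the end filter keeps exactly the end of the first run, then recurses on the rest
theorem pvEnd_filter : ∀ (rest : List Int) (y : Int) (F : List Int),
    (∀ z ∈ y :: rest, z ∈ F) →
    ((pvSpanRun y rest).1 + 1) ∉ F →
    (y :: rest).filter (fun x => !decide ((x + 1) ∈ F))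
      = (pvSpanRun y rest).1 :: (pvSpanRun y rest).2.filter (fun x => !decide ((x + 1) ∈ F)) := by
  intro rest
  induction rest with
  | nil =>
    intro y F _ hEnd
    simp only [pvSpanRun] at hEnd ⊢
    simp [hEnd]
  | cons x r2 ih =>
    intro y F hF hEnd
    by_cases hx : x = y + 1
    · have hxF : x ∈ F := hF x (by simp)
      have hdrop : (!decide ((y + 1) ∈ F)) = false := by
        simp [← hx, hxF]
      rw [pvSpanRun_cons_succ y x r2 hx] at hEnd ⊢
      rw [List.filter_cons, hdrop]
      rw [if_neg (by simp)]
      exact ih x F (fun z hz => hF z (by simpa using Or.inr (List.mem_cons.1 hz))) hEnd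
    · rw [pvSpanRun_cons_ne y x r2 hx] at hEnd ⊢
      have hkeep : (!decide ((y + 1) ∈ F)) = true := by simp [hEnd]
      rw [List.filter_cons, hkeep]
      rw [if_pos rfl]

-- main invariant: on a strictly increasing segment seg of F whose non-seg part of F
-- lies at most B with B + 2 ≤ min seg, zipping the start/end filters gives the runs
theorem pvMain_gen : ∀ (n : Nat) (seg F : List Int) (B : Int),
    seg.length ≤ n →
    seg.Pairwise (· < ·) →
    (∀ z ∈ seg, z ∈ F) →
    (∀ z ∈ F, z ∈ seg ∨ z ≤ B) →
    (∀ z ∈ seg, B + 2 ≤ z) →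
    (seg.filter (fun x => !decide ((x - 1) ∈ F))).zip (seg.filter (fun x => !decide ((x + 1) ∈ F)))
      = pvRuns seg := by
  intro n
  induction n with
  | zero =>
    intro seg F B hlen _ _ _ _
    have : seg = [] := List.length_eq_zero_iff.1 (Nat.le_zero.1 hlen)
    subst this
    simp [pvRuns]
  | succ n ih =>
    intro seg F B hlen hpw hsub hFcover hBlow
    cases seg with
    | nil => simp [pvRuns]
    | cons y rest =>
      obtain ⟨hye, hr'low, hcover, hr'pw, hr'sub⟩ := pvSpan_props rest y hpw
      have hBy : B + 2 ≤ y := hBlow y (by simp)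
      -- y - 1 is not in F
      have hstartF : (y - 1) ∉ F := by
        intro hmem
        rcases hFcover _ hmem with h | h
        · rcases List.mem_cons.1 h with h' | h'
          · omega
          · have := (List.pairwise_cons.1 hpw).1 _ h'
            omega
        · omega
      -- end + 1 is not in F
      have hendF : ((pvSpanRun y rest).1 + 1) ∉ F := by
        intro hmem
        rcases hFcover _ hmem with h | h
        · rcases hcover _ h with h' | h'
          · omega
          · have := hr'low _ h'
            omega
        · omega
      have hkeepy : (!decide ((y - 1) ∈ F)) = true := by simp [hstartF]
      have hstarts : (y :: rest).filter (fun x => !decide ((x - 1) ∈ F))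
          = y :: (pvSpanRun y rest).2.filter (fun x => !decide ((x - 1) ∈ F)) := by
        rw [List.filter_cons, hkeepy, if_pos rfl]
        rw [pvConsumed_dropped rest y F hsub]

      have hends := pvEnd_filter rest y F hsub hendF
      rw [hstarts, hends, List.zip_cons_cons, pvRuns]
      congr 1
      exact ih (pvSpanRun y rest).2 F (pvSpanRun y rest).1
        (by have := pvSpanRun_length y rest; simp only [List.length_cons] at hlen; omega)
        hr'pw
        (fun z hz => hsub z (by simp [hr'sub z hz]))
        (fun z hz => by
          rcases hFcover z hz with h | h
          · rcases hcover z h with h' | h'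
            · right; exact h'
            · left; exact h'
          · right; omega)
        hr'low

-- sorting a membership-boundary filter of the set equals filtering the sorted set
theorem pvSortedFilter (s ys : List Int) (f : Int → Int)
    (hperm : ys.Perm s) (hpw : ys.Pairwise (· < ·)) :
    PySem.List.sorted (s.filter (fun x => !PySem.Set.contains s (f x))) (fun x => x) false
      = ys.filter (fun x => !decide (f x ∈ ys)) := by
  have hpred : ∀ x : Int, (!PySem.Set.contains s (f x)) = (!decide (f x ∈ ys)) := by
    intro x
    simp [PySem.Set.contains_eq_listContains, hperm.mem_iff]
  have hpermf : (ys.filter (fun x => !decide (f x ∈ ys))).Perm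
      (s.filter (fun x => !PySem.Set.contains s (f x))) := by
    have h1 : ys.filter (fun x => !PySem.Set.contains s (f x))
        = ys.filter (fun x => !decide (f x ∈ ys)) :=
      List.filter_congr (fun x _ => hpred x)
    rw [← h1]
    exact hperm.filter _
  have hpwf : (ys.filter (fun x => !decide (f x ∈ ys))).Pairwise (· < ·) :=
    List.Pairwise.sublist List.filter_sublist hpw
  exact PySem.List.sorted_eq_of_perm_of_pairwise_lt _ _ _ hpermf hpwf

-- B computes the formatted runs of sorted(set(indices))
theorem pvAlt_eq_runs (chain : String) (indices : List Int) :
    collapse_ranges_alt chain indices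
      = (pvRuns (PySem.List.sorted (PySem.Set.ofList indices) (fun x => x) false)).map
          (fun g => pvTok chain g.1 g.2) := by
  have hperm : (PySem.List.sorted (PySem.Set.ofList indices) (fun x => x) false).Perm
      (PySem.Set.ofList indices) := PySem.List.sorted_perm ..
  have hpw : (PySem.List.sorted (PySem.Set.ofList indices) (fun x => x) false).Pairwise (· < ·) :=
    PySem.List.sorted_ofList_pairwise_lt ..
  set ys := PySem.List.sorted (PySem.Set.ofList indices) (fun x => x) false with hys
  have hstart : PySem.List.sorted
      ((PySem.Set.ofList indices).filter (fun x => !PySem.Set.contains (PySem.Set.ofList indices) (x - 1))) (fun x => x) false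
      = ys.filter (fun x => !decide ((x - 1) ∈ ys)) :=
    pvSortedFilter (PySem.Set.ofList indices) ys (fun x => x - 1) hperm hpw
  have hend : PySem.List.sorted
      ((PySem.Set.ofList indices).filter (fun x => !PySem.Set.contains (PySem.Set.ofList indices) (x + 1))) (fun x => x) false
      = ys.filter (fun x => !decide ((x + 1) ∈ ys)) :=
    pvSortedFilter (PySem.Set.ofList indices) ys (fun x => x + 1) hperm hpw
  show ((PySem.List.sorted
      ((PySem.Set.ofList indices).filter (fun x => !PySem.Set.contains (PySem.Set.ofList indices) (x - 1))) (fun x => x) false).zip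
    (PySem.List.sorted
      ((PySem.Set.ofList indices).filter (fun x => !PySem.Set.contains (PySem.Set.ofList indices) (x + 1))) (fun x => x) false)).map
      (fun p => if p.1 = p.2 then chain ++ PySem.Int.toStr p.1
        else chain ++ PySem.Int.toStr p.1 ++ "-" ++ PySem.Int.toStr p.2)
    = (pvRuns ys).map (fun g => pvTok chain g.1 g.2)
  rw [hstart, hend]
  cases hys' : ys with
  | nil => simp [pvRuns]
  | cons y rest =>
    have hpw' : (y :: rest).Pairwise (· < ·) := hys' ▸ hpw
    have hmain := pvMain_gen (y :: rest).length (y :: rest) (y :: rest) (y - 2)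
      (le_refl _) hpw' (fun z hz => hz)
      (fun z hz => Or.inl hz)
      (fun z hz => by
        rcases List.mem_cons.1 hz with h | h
        · omega
        · have := (List.pairwise_cons.1 hpw').1 z h
          omega)
    rw [hmain]
    rfl

theorem collapse_ranges_eq_alt (chain : String) (indices : List Int) :
    collapse_ranges chain indices = collapse_ranges_alt chain indices := by
  rw [pvAlt_eq_runs]
  unfold collapse_ranges
  by_cases h : indices = []
  · subst h
    have h1 : PySem.List.sorted (PySem.Set.ofList ([] : List Int)) (fun x => x) false = [] := by decide
    rw [if_pos rfl, h1, pvRuns]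
    simp
  · simp only [if_neg h]
    cases hys : PySem.List.sorted (PySem.Set.ofList indices) (fun x => x) false with
    | nil => simp [pvRuns]
    | cons y rest =>
      have := pvLoop_runs chain rest y y []
      simp only [List.nil_append] at this
      dsimp only
      rw [this, pvRuns]

-- ===== VERDICT (by name: the statement is the Claim_ definition above) =====
theorem collapse_ranges_spec : Claim_equal_collapse_ranges := by
  intro chain indices _
  exact collapse_ranges_eq_alt chain indices
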